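-- pv_equiv track=rewrite | github.com/hyunjun/practice | python/problem-ETC/create_target_array_in_the_given_order.py | createTargetArray
-- ===== SOURCE A (Python) =====
-- from collections import defaultdict
-- from typing import List
--
-- def createTargetArray(nums: List[int], index: List[int]) -> List[int]:
--     if nums is None or not (1 <= len(nums) <= 100):
--         return []
--     d = defaultdict(list)
--     for i, n in enumerate(nums):
--         d[index[i]].append(n)
--     target = []
--     for i in range(max(index) + 1):
--         target.extend(d[i][::-1])
--     return target
-- ===== SOURCE B (Python) =====
-- from typing import List
--
-- def createTargetArray(nums: List[int], index: List[int]) -> List[int]: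
--     if nums is None or not (1 <= len(nums) <= 100):
--         return []
--     target = []
--     for i in range(max(index) + 1):
--         # positions scanned last-to-first: among equal target indices the
--         # latest insertion lands first (each insert shifts earlier ones right)
--         for j in range(len(nums) - 1, -1, -1):
--             if index[j] == i:
--                 target.append(nums[j])
--     return target
-- ===== Notes on version B (the rewrite author's own statement) =====
-- stated objective: simpler
-- what changed: Drops the defaultdict bucket-grouping and per-bucket slice reversal: the output is built directly by a plain nested scan, for each output index value selecting the matching positions last-to-first; Pre_ only excludes inputs where A raises (index shorter than nums, so index[i] IndexErrors).
import Mathlib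
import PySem

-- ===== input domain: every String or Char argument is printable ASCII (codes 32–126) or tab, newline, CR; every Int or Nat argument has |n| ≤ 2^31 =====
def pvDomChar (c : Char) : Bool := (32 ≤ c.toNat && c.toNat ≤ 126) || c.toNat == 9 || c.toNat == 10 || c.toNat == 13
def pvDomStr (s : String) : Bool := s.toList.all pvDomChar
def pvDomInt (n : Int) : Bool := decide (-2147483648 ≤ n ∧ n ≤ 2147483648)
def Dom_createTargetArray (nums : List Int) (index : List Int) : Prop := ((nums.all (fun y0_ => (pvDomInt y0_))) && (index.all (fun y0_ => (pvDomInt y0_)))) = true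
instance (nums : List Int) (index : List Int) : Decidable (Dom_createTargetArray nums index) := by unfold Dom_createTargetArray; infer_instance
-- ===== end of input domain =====

-- B drops A's defaultdict grouping and per-bucket slice reversal and builds the output by a
-- direct nested scan (for each output index value, matching positions last-to-first): simpler code.

-- ===== PORT A =====
-- 'nums is None' cannot arise for a List argument and is dropped; index[i] is a defaulted
-- lookup (exact under Pre_, which excludes the IndexError inputs), max(index) = none would be
-- Python's ValueError on an empty index (also excluded by Pre_), and d[i][::-1] is exactly
-- List.reverse of the bucket.
def createTargetArray (nums : List Int) (index : List Int) : List Int :=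
  if ¬ (1 ≤ nums.length ∧ nums.length ≤ 100) then []
  else
    let d := (PySem.List.enumerate nums).foldl
      (fun d p => d.modify (PySem.List.pyGetD index p.1 0) [] (fun l => l ++ [p.2]))
      PySem.Dict.empty
    match PySem.List.max? index (fun x => x) with
    | none => []
    | some m =>
      (PySem.List.pyRange 0 (m + 1)).foldl (fun t i => t ++ (d.getD i []).reverse) []

-- ===== PORT B =====
-- same guard; the nested for-loops become nested foldls over the same ranges
-- (range(len(nums)-1, -1, -1) is pyRange with step -1), appending on the same test.
def createTargetArray_alt (nums : List Int) (index : List Int) : List Int :=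
  if ¬ (1 ≤ nums.length ∧ nums.length ≤ 100) then []
  else
    match PySem.List.max? index (fun x => x) with
    | none => []
    | some m =>
      (PySem.List.pyRange 0 (m + 1)).foldl (fun t i =>
        (PySem.List.pyRange ((nums.length : Int) - 1) (-1) (-1)).foldl (fun t j =>
          if PySem.List.pyGetD index j 0 == i then t ++ [PySem.List.pyGetD nums j 0] else t) t) []

-- ===== PRECONDITION & SPEC =====
-- Pre_ excludes exactly the inputs where A raises: when the length guard passes, Python A
-- evaluates index[i] for every i < len(nums) (IndexError if index is shorter; this also covers
-- max([]) which would raise ValueError).  It excludes nothing on which A returns.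
def Pre_createTargetArray (nums : List Int) (index : List Int) : Prop :=
  (1 ≤ nums.length ∧ nums.length ≤ 100) → nums.length ≤ index.length
instance (nums : List Int) (index : List Int) : Decidable (Pre_createTargetArray nums index) := by
  unfold Pre_createTargetArray; infer_instance
def pvWitness_createTargetArray : List Int × List Int := ([5, 3, 7], [0, 1, 0])

def Spec_createTargetArray (nums : List Int) (index : List Int) (out : List Int) : Prop :=
  out = createTargetArray_alt nums index
instance (nums : List Int) (index : List Int) (out : List Int) :
    Decidable (Spec_createTargetArray nums index out) := by
  unfold Spec_createTargetArray; infer_instance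

-- ===== CLAIM =====
def Claim_equal_createTargetArray : Prop :=
  ∀ (nums : List Int) (index : List Int), Dom_createTargetArray nums index →
    Pre_createTargetArray nums index →
    Spec_createTargetArray nums index (createTargetArray nums index)

-- ===== LEMMAS AND PROOFS =====

-- A's dict after the grouping loop: bucket i holds nums[j] for the positions j (in order)
-- whose index value is i.
theorem pv_dict_char (nums index : List Int) (i : Int) :
    (((PySem.List.enumerate nums).foldl
        (fun d p => d.modify (PySem.List.pyGetD index p.1 0) [] (fun l => l ++ [p.2]))
        PySem.Dict.empty).getD i []) =
      (((PySem.List.pyRange 0 (nums.length : Int)).filter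
          (fun j => PySem.List.pyGetD index j 0 == i)).map
        (fun j => PySem.List.pyGetD nums j 0)) := by
  rw [PySem.List.enumerate_eq_map_pyRange nums 0, List.foldl_map]
  have hlen' : PySem.List.len nums = (nums.length : Int) := by
    simp [PySem.List.len]
  rw [hlen']
  have hstep :
      ((PySem.List.pyRange 0 (nums.length : Int)).map
          (fun j => ((PySem.List.pyGetD index j 0 : Int), PySem.List.pyGetD nums j 0))).foldl
          (fun d (p : Int × Int) => d.modify p.1 [] (fun l => l ++ [p.2]))
          PySem.Dict.empty =
      (PySem.List.pyRange 0 (nums.length : Int)).foldl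
          (fun d j => d.modify (PySem.List.pyGetD index j 0) []
            (fun l => l ++ [PySem.List.pyGetD nums j 0]))
          PySem.Dict.empty := List.foldl_map
  rw [show (PySem.List.pyRange 0 (nums.length : Int)).foldl
        (fun d j => d.modify (PySem.List.pyGetD index ((j, PySem.List.pyGetD nums j 0) : Int × Int).1 0) []
          (fun l => l ++ [((j, PySem.List.pyGetD nums j 0) : Int × Int).2]))
        PySem.Dict.empty =
      (PySem.List.pyRange 0 (nums.length : Int)).foldl
        (fun d j => d.modify (PySem.List.pyGetD index j 0) []
          (fun l => l ++ [PySem.List.pyGetD nums j 0]))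
        PySem.Dict.empty from rfl]
  rw [← hstep, PySem.Dict.getD_foldl_modify_append]
  rw [show (PySem.Dict.empty : PySem.Dict Int (List Int)).getD i [] = [] by
        simp [PySem.Dict.getD, PySem.Dict.get?, PySem.Dict.empty]]
  rw [List.nil_append, List.filter_map, List.map_map]
  rfl

theorem createTargetArray_eq (nums index : List Int) :
    createTargetArray nums index = createTargetArray_alt nums index := by
  unfold createTargetArray createTargetArray_alt
  by_cases hg : 1 ≤ nums.length ∧ nums.length ≤ 100
  · rw [if_neg (by simpa using hg), if_neg (by simpa using hg)]
    cases hm : PySem.List.max? index (fun x => x) with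
    | none => rfl
    | some m =>
      simp only
      -- B's inner loop: append nums[j] over the countdown range when index[j] == i
      have hinner : ∀ (t : List Int) (i : Int),
          (PySem.List.pyRange ((nums.length : Int) - 1) (-1) (-1)).foldl (fun t j =>
            if PySem.List.pyGetD index j 0 == i then t ++ [PySem.List.pyGetD nums j 0] else t) t =
          t ++ (((PySem.List.pyRange 0 (nums.length : Int)).filter
              (fun j => PySem.List.pyGetD index j 0 == i)).map
            (fun j => PySem.List.pyGetD nums j 0)).reverse := by
        intro t i
        rw [PySem.List.foldl_append_if]
        congr 1
        rw [PySem.List.pyRange_neg_one_eq_reverse]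
        rw [show (-1 : Int) + 1 = 0 from rfl, show (nums.length : Int) - 1 + 1 = (nums.length : Int) by ring]
        rw [List.filter_reverse, List.map_reverse]
      simp only [hinner]
      rw [PySem.List.foldl_append_eq_flatMap, PySem.List.foldl_append_eq_flatMap,
          List.nil_append, List.nil_append]
      apply List.flatMap_congr
      intro i _
      rw [pv_dict_char nums index i]
  · rw [if_pos (by simpa using hg), if_pos (by simpa using hg)]

-- ===== VERDICT =====
theorem createTargetArray_spec : Claim_equal_createTargetArray := by
  intro nums index _ _
  unfold Spec_createTargetArray
  exact createTargetArray_eq nums index
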